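-- pv_equiv track=rewrite | github.com/Kinetics20/B_A_P_D | workshop/try_exam/task_02.py | name_sorter
-- ===== SOURCE A (Python) =====
-- def name_sorter(any_list):
--     new_dict = {'female': [], 'male': []}
--     for word in sorted(any_list):
--         if word[-1] == 'a':
--             new_dict['female'].append(word)
--         else:
--             new_dict['male'].append(word)
--     return new_dict
-- ===== SOURCE B (Python) =====
-- def name_sorter(any_list):
--     female, male = [], []
--     for word in any_list:
--         bucket = female if word[-1] == 'a' else male
--         i = 0
--         while i < len(bucket) and bucket[i] <= word:
--             i += 1
--         bucket.insert(i, word)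
--     return {'female': female, 'male': male}
-- ===== Notes on version B (the rewrite author's own statement) =====
-- stated objective: alternative
-- what changed: B never calls sorted(): it makes a single online pass over the raw input, inserting each word at its ordered position in the proper gender bucket (insertion sort maintained incrementally), instead of A's sort-everything-then-append loop into a dict.
import Mathlib
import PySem

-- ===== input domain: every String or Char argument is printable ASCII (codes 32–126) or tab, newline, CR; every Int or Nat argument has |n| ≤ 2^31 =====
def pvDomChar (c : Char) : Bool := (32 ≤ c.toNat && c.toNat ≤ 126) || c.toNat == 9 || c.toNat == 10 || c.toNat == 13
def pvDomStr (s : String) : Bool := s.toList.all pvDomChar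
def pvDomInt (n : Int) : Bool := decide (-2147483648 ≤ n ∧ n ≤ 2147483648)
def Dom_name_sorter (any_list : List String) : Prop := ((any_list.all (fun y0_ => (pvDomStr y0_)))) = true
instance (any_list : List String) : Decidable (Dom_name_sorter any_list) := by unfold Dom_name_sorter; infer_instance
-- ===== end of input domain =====

-- B drops sorted() entirely: one online pass inserting each word at its ordered place in the proper gender bucket (incremental insertion sort), vs A's sort-then-append loop; no speed claim.


-- shared helper: word[-1] == 'a' (PySem.Str.pyGet? returns none on "", where Python raises IndexError; Pre_ excludes that)
def pvLastIsA (w : String) : Bool := PySem.Str.pyGet? w (-1) == some 'a'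

-- ===== PORT A =====
def name_sorter (any_list : List String) : List (String × List String) :=
  let new_dict : PySem.Dict String (List String) := PySem.Dict.ofList [("female", []), ("male", [])]
  let new_dict :=
    (PySem.List.sorted any_list (fun w => w)).foldl
      (fun d word =>
        if pvLastIsA word then
          PySem.Dict.modify d "female" [] (fun l => l ++ [word])
        else
          PySem.Dict.modify d "male" [] (fun l => l ++ [word]))
      new_dict
  new_dict.items

-- ===== PORT B =====
-- B's inner while-loop + bucket.insert(i, word): walk past the elements ≤ word, insert word there
def pvIns (w : String) : List String → List String
  | [] => [w]
  | h :: t => if h ≤ w then h :: pvIns w t else w :: h :: t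

def name_sorter_alt (any_list : List String) : List (String × List String) :=
  let fm :=
    any_list.foldl
      (fun (fm : List String × List String) word =>
        if pvLastIsA word then (pvIns word fm.1, fm.2) else (fm.1, pvIns word fm.2))
      ([], [])
  [("female", fm.1), ("male", fm.2)]

-- ===== PRECONDITION & SPEC =====
-- Pre_ excludes only inputs on which A raises: an empty string makes word[-1] an IndexError.
def Pre_name_sorter (any_list : List String) : Prop := "" ∉ any_list
instance (any_list : List String) : Decidable (Pre_name_sorter any_list) := by unfold Pre_name_sorter; infer_instance
def pvWitness_name_sorter : List String := ["bella", "Tom", "anna"]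

def Spec_name_sorter (any_list : List String) (out : List (String × List String)) : Prop := out = name_sorter_alt any_list
instance (any_list : List String) (out : List (String × List String)) : Decidable (Spec_name_sorter any_list out) := by unfold Spec_name_sorter; infer_instance

-- ===== CLAIM (what is proved, stated in full; the proofs are below) =====
def Claim_equal_name_sorter : Prop := ∀ (any_list : List String), Dom_name_sorter any_list → Pre_name_sorter any_list → Spec_name_sorter any_list (name_sorter any_list)

-- ===== LEMMAS AND PROOFS =====

-- one step of A's loop on the two-key dict
lemma pv_step (f m : List String) (w : String) :
    (if pvLastIsA w then
        PySem.Dict.modify (PySem.Dict.ofList [("female", f), ("male", m)]) "female" [] (fun l => l ++ [w])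
      else
        PySem.Dict.modify (PySem.Dict.ofList [("female", f), ("male", m)]) "male" [] (fun l => l ++ [w]))
    = PySem.Dict.ofList [("female", if pvLastIsA w then f ++ [w] else f),
                         ("male", if pvLastIsA w then m else m ++ [w])] := by
  by_cases h : pvLastIsA w = true <;> simp [h] <;> rfl

-- A's whole loop, as a function of the accumulated buckets
lemma pv_loop (l : List String) (f m : List String) :
    ((l.foldl
        (fun d word =>
          if pvLastIsA word then
            PySem.Dict.modify d "female" [] (fun l => l ++ [word])
          else
            PySem.Dict.modify d "male" [] (fun l => l ++ [word]))
        (PySem.Dict.ofList [("female", f), ("male", m)])).items)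
    = [("female", f ++ l.filter (fun w => pvLastIsA w)),
       ("male", m ++ l.filter (fun w => !pvLastIsA w))] := by
  induction l generalizing f m with
  | nil => simp; rfl
  | cons w t ih =>
    rw [List.foldl_cons, pv_step, ih]
    by_cases h : pvLastIsA w = true <;> simp [h]

-- sorting commutes with filtering (for the identity key)
lemma pv_sorted_filter (xs : List String) (p : String → Bool) :
    PySem.List.sorted (xs.filter p) (fun x => x)
      = (PySem.List.sorted xs (fun x => x)).filter p :=
  PySem.List.sorted_id_eq_of_perm_of_pairwise _ _
    ((PySem.List.sorted_perm xs (fun x => x) false).filter p)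
    ((PySem.List.sorted_pairwise xs (fun x => x)).filter p)

-- B's ≤-scan insertion is the library's stable insertBy (insert after equal elements)
lemma pv_ins_eq_insertBy (w : String) (l : List String) :
    pvIns w l = PySem.List.insertBy (fun a b => decide (a < b)) w l := by
  induction l with
  | nil => simp [pvIns, PySem.List.insertBy]
  | cons h t ih =>
      simp only [pvIns, PySem.List.insertBy, ih]
      rcases lt_trichotomy h w with h1 | h1 | h1
      · simp [not_lt.mpr h1.le]
        intro hc; exact absurd hc (not_lt.mpr (String.le_iff_toList_le.mp h1.le))
      · subst h1; simp
      · simp [h1]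
        intro hc; exact absurd hc (not_le.mpr (String.lt_iff_toList_lt.mp h1))

-- B's single pass over the raw list splits into two insertion folds over the filtered sublists
lemma pv_fold_split (l : List String) (f m : List String) :
    l.foldl
        (fun (fm : List String × List String) word =>
          if pvLastIsA word then (pvIns word fm.1, fm.2) else (fm.1, pvIns word fm.2))
        (f, m)
    = ((l.filter (fun w => pvLastIsA w)).foldl (fun acc w => pvIns w acc) f,
       (l.filter (fun w => !pvLastIsA w)).foldl (fun acc w => pvIns w acc) m) := by
  induction l generalizing f m with
  | nil => rfl
  | cons w t ih =>
      by_cases h : pvLastIsA w = true <;> simp [h, ih]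

-- an insertion fold over a list from the empty bucket is exactly Python's sorted
lemma pv_fold_ins_sorted (l : List String) :
    l.foldl (fun acc w => pvIns w acc) [] = PySem.List.sorted l (fun x => x) := by
  rw [PySem.List.sorted_eq_foldl_insertBy]
  simp only [pv_ins_eq_insertBy]

-- ===== VERDICT (by name: the statement is the Claim_ definition above) =====
theorem name_sorter_spec : Claim_equal_name_sorter := by
  intro xs _ _
  show name_sorter xs = name_sorter_alt xs
  simp only [name_sorter, name_sorter_alt, pv_loop, pv_fold_split, pv_fold_ins_sorted,
    pv_sorted_filter, List.nil_append]
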